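-- pv_equiv track=rewrite | github.com/KNU-HAEDAL/2024-SS-small-group-ALSol | JYPARK/11to20/16.py | solution
-- ===== SOURCE A (Python) =====
-- import math
--
-- def solution(progresses, speeds):
--     answer = []
--     left_days = [0] * len(progresses)
--
--     for i in range(len(progresses)):
--         left_days[i] = math.ceil((100 - progresses[i]) / speeds[i])
--
--     count = 0
--     max_day = left_days[0]
--     for i in range(len(left_days)):
--         if left_days[i] <= max_day:
--             count += 1
--         else:
--             answer.append(count)
--             count = 1
--             max_day = left_days[i]
--     answer.append(count)
--     return answer
-- ===== SOURCE B (Python) =====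
-- import math
--
-- def solution(progresses, speeds):
--     days = [math.ceil((100 - p) / s) for p, s in zip(progresses, speeds)]
--     # each task is actually deployed on the running maximum of the days so far
--     release = []
--     m = days[0]
--     for d in days:
--         m = max(m, d)
--         release.append(m)
--     # group sizes = multiplicities of each release day, in first-seen order
--     counts = {}
--     for r in release:
--         counts[r] = counts.get(r, 0) + 1
--     return list(counts.values())
-- ===== Notes on version B (the rewrite author's own statement) =====
-- stated objective: alternative
-- what changed: A's single scan with a (count, max_day) flush-on-break state machine is replaced by computing each task's actual release day as a running maximum and then returning the multiplicities of each release day from a dict histogram in first-seen order.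
import Mathlib
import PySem

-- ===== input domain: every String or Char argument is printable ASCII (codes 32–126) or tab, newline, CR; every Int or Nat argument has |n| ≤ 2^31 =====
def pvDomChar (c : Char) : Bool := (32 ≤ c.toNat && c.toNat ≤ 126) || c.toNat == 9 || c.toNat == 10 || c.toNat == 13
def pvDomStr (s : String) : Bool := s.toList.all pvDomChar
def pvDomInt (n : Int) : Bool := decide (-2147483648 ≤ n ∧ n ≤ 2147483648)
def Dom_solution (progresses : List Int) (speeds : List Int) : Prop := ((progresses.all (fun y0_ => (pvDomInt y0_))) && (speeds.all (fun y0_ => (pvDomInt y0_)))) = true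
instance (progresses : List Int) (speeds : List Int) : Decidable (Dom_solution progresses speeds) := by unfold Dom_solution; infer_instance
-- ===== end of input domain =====

-- B re-decomposes A's flag scan: it computes each task's actual release day as a running
-- maximum, then returns the multiplicities of each release day via a dict histogram
-- (first-seen order); same O(n) cost, a different data structure.


-- math.ceil(a / b) for ints: -((-a) // b); exact on Dom (|a| ≤ 2^31 + 100 < 2^52, so the
-- float division's rounding error is below the distance of a non-integer quotient to any integer)
def pvCeilDiv (a b : Int) : Int := -(PySem.Int.floordiv (-a) b)

-- ===== PORT A =====
def solution (progresses : List Int) (speeds : List Int) : List Int :=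
  let leftDays := (PySem.List.pyRange 0 progresses.length 1).map
      (fun i => pvCeilDiv (100 - PySem.List.pyGetD progresses i 0) (PySem.List.pyGetD speeds i 0))
  let init : List Int × Int × Int := ([], 0, PySem.List.pyGetD leftDays 0 0)  -- (answer, count, max_day); reading left_days[0] raises on empty input (excluded by Pre_)
  let st := (PySem.List.pyRange 0 leftDays.length 1).foldl
      (fun (st : List Int × Int × Int) i =>
        if PySem.List.pyGetD leftDays i 0 ≤ st.2.2 then (st.1, st.2.1 + 1, st.2.2)
        else (st.1 ++ [st.2.1], 1, PySem.List.pyGetD leftDays i 0)) init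
  st.1 ++ [st.2.1]

-- ===== PORT B =====
def solution_alt (progresses : List Int) (speeds : List Int) : List Int :=
  let days := (progresses.zip speeds).map (fun ps => pvCeilDiv (100 - ps.1) ps.2)
  -- running maximum: state (release, m), m starting at days[0] (raises on empty input, excluded by Pre_)
  let release := (days.foldl
      (fun (acc : List Int × Int) d => (acc.1 ++ [max acc.2 d], max acc.2 d))
      ([], PySem.List.pyGetD days 0 0)).1
  -- histogram of release days, in first-seen order
  let counts := release.foldl
      (fun (c : PySem.Dict Int Int) r => c.insert r (c.getD r 0 + 1)) PySem.Dict.empty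
  PySem.Dict.values counts

-- ===== PRECONDITION & SPEC =====
-- Pre_ excludes exactly the inputs where Python A raises: empty progresses (IndexError on
-- left_days[0]), speeds shorter than progresses (IndexError), or a zero speed among the used
-- entries (ZeroDivisionError).
def Pre_solution (progresses : List Int) (speeds : List Int) : Prop :=
  progresses ≠ [] ∧ progresses.length ≤ speeds.length ∧
    ((speeds.take progresses.length).all (fun s => s ≠ 0)) = true
instance (progresses : List Int) (speeds : List Int) : Decidable (Pre_solution progresses speeds) := by unfold Pre_solution; infer_instance

def pvWitness_solution : List Int × List Int := ([93, 30, 55], [1, 30, 5])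

def Spec_solution (progresses : List Int) (speeds : List Int) (out : List Int) : Prop := out = solution_alt progresses speeds
instance (progresses : List Int) (speeds : List Int) (out : List Int) : Decidable (Spec_solution progresses speeds out) := by unfold Spec_solution; infer_instance

-- ===== CLAIM (what is proved, stated in full; the proofs are below) =====
def Claim_equal_solution : Prop := ∀ (progresses : List Int) (speeds : List Int), Dom_solution progresses speeds → Pre_solution progresses speeds → Spec_solution progresses speeds (solution progresses speeds)

-- ===== LEMMAS AND PROOFS =====

-- A's fold, written as a recursion over the day list: (count so far, current max, rest)
def pvGroupsFrom (c m : Int) : List Int → List Int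
  | [] => [c]
  | x :: xs => if x ≤ m then pvGroupsFrom (c + 1) m xs else c :: pvGroupsFrom 1 x xs

def pvStepA (st : List Int × Int × Int) (d : Int) : List Int × Int × Int :=
  if d ≤ st.2.2 then (st.1, st.2.1 + 1, st.2.2) else (st.1 ++ [st.2.1], 1, d)

theorem pv_foldA (l ans : List Int) (c m : Int) :
    (l.foldl pvStepA (ans, c, m)).1 ++ [(l.foldl pvStepA (ans, c, m)).2.1]
      = ans ++ pvGroupsFrom c m l := by
  induction l generalizing ans c m with
  | nil => simp [pvGroupsFrom]
  | cons x xs ih =>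
    by_cases h : x ≤ m
    · simp [List.foldl, pvStepA, h, pvGroupsFrom, ih]
    · simp [List.foldl, pvStepA, h, pvGroupsFrom, ih]

-- B's running-maximum list, as a recursion
def pvRel (m : Int) : List Int → List Int
  | [] => []
  | d :: ds => max m d :: pvRel (max m d) ds

theorem pv_foldB (l acc : List Int) (m : Int) :
    (l.foldl (fun (acc : List Int × Int) d => (acc.1 ++ [max acc.2 d], max acc.2 d)) (acc, m)).1
      = acc ++ pvRel m l := by
  induction l generalizing acc m with
  | nil => simp [pvRel]
  | cons d ds ih => simp [List.foldl, pvRel, ih]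

theorem pv_le_of_mem_rel (l : List Int) (m y : Int) (hy : y ∈ pvRel m l) : m ≤ y := by
  induction l generalizing m with
  | nil => simp [pvRel] at hy
  | cons d ds ih =>
    simp only [pvRel, List.mem_cons] at hy
    rcases hy with h | h
    · omega
    · have := ih (max m d) h; omega

theorem pv_replicate_shift (c : Nat) (m : Int) (l : List Int) :
    List.replicate c m ++ m :: l = List.replicate (c + 1) m ++ l := by
  rw [List.replicate_succ']; simp

theorem pv_ofList_replicate (c : Nat) (hc : 0 < c) (m : Int) :
    PySem.Set.ofList (List.replicate c m) = [m] := by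
  obtain ⟨k, rfl⟩ : ∃ k, c = k + 1 := ⟨c - 1, by omega⟩
  rw [List.replicate_succ, PySem.Set.ofList_cons]
  have : PySem.Set.discard (PySem.Set.ofList (List.replicate k m)) m = [] := by
    rw [List.eq_nil_iff_forall_not_mem]
    intro y hy
    rw [PySem.Set.mem_discard] at hy
    exact hy.2 (List.eq_of_mem_replicate ((PySem.Set.mem_ofList _ _).1 hy.1))
  rw [this]

theorem pv_ofList_replicate_append_fresh (c : Nat) (hc : 0 < c) (m : Int) (l : List Int)
    (hm : m ∉ l) :
    PySem.Set.ofList (List.replicate c m ++ l) = m :: PySem.Set.ofList l := by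
  rw [PySem.Set.ofList_append, pv_ofList_replicate c hc m,
    PySem.Set.update_eq_append_filter]
  have : (PySem.Set.ofList l).filter (fun y => !(PySem.Set.contains [m] y))
      = PySem.Set.ofList l := by
    apply List.filter_eq_self.2
    intro y hy
    have hyl : y ∈ l := (PySem.Set.mem_ofList _ _).1 hy
    have : y ≠ m := fun h => hm (h ▸ hyl)
    simp [PySem.Set.contains_eq_listContains, this]
  rw [this]; rfl

-- the key bridge: A's grouping = multiplicities of each running maximum, in first-seen order
theorem pv_key (xs : List Int) (m : Int) (c : Nat) (hc : 0 < c) :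
    pvGroupsFrom (c : Int) m xs
      = (PySem.Set.ofList (List.replicate c m ++ pvRel m xs)).map
          (fun k => (((List.replicate c m ++ pvRel m xs).count k : Nat) : Int)) := by
  induction xs generalizing m c with
  | nil =>
    simp only [pvRel, List.append_nil, pv_ofList_replicate c hc m, List.map_cons,
      List.map_nil, List.count_replicate_self, pvGroupsFrom]
  | cons x rest ih =>
    by_cases h : x ≤ m
    · have hmax : max m x = m := max_eq_left h
      have hlist : List.replicate c m ++ pvRel m (x :: rest)
          = List.replicate (c + 1) m ++ pvRel m rest := by
        simp only [pvRel, hmax, pv_replicate_shift]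
      rw [hlist]
      have := ih m (c + 1) (by omega)
      rw [show ((c + 1 : Nat) : Int) = (c : Int) + 1 from by push_cast; ring] at this
      simpa [pvGroupsFrom, h] using this
    · have hmax : max m x = x := max_eq_right (by omega)
      have hfresh : m ∉ x :: pvRel x rest := by
        intro hmem
        rcases List.mem_cons.1 hmem with h' | h'
        · omega
        · have := pv_le_of_mem_rel rest x m h'; omega
      have hlist : List.replicate c m ++ pvRel m (x :: rest)
          = List.replicate c m ++ x :: pvRel x rest := by
        simp only [pvRel, hmax]
      rw [hlist, pv_ofList_replicate_append_fresh c hc m _ hfresh, List.map_cons]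
      have hcm : ((List.replicate c m ++ x :: pvRel x rest).count m : Int) = (c : Int) := by
        rw [List.count_append, List.count_replicate_self,
          List.count_eq_zero.2 hfresh]
        push_cast; ring
      have htail : (PySem.Set.ofList (x :: pvRel x rest)).map
            (fun k => (((List.replicate c m ++ x :: pvRel x rest).count k : Nat) : Int))
          = (PySem.Set.ofList (x :: pvRel x rest)).map
            (fun k => (((x :: pvRel x rest).count k : Nat) : Int)) := by
        apply List.map_congr_left
        intro k hk
        have hkmem : k ∈ x :: pvRel x rest := (PySem.Set.mem_ofList _ _).1 hk
        have hkm : k ≠ m := by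
          rcases List.mem_cons.1 hkmem with h' | h'
          · omega
          · have := pv_le_of_mem_rel rest x k h'; omega
        simp [List.count_append, List.count_replicate, Ne.symm hkm]
      rw [hcm, htail]
      have := ih x 1 (by omega)
      simp only [List.replicate_one, List.singleton_append] at this
      rw [pvGroupsFrom, if_neg h, ← this]
      norm_num

-- ===== VERDICT (by name: the statement is the Claim_ definition above) =====
theorem solution_spec : Claim_equal_solution := by
  intro progresses speeds _hdom hpre
  obtain ⟨hne, hle, _hz⟩ := hpre
  unfold Spec_solution
  simp only [solution, solution_alt]
  -- the two day lists are equal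
  have hdays : (PySem.List.pyRange 0 (progresses.length : Int) 1).map
        (fun i => pvCeilDiv (100 - PySem.List.pyGetD progresses i 0)
          (PySem.List.pyGetD speeds i 0))
      = (progresses.zip speeds).map (fun ps => pvCeilDiv (100 - ps.1) ps.2) := by
    apply List.ext_getElem
    · simp [PySem.List.length_pyRange_one]
      omega
    · intro k h1 h2
      have hk : k < progresses.length := by
        simpa [PySem.List.length_pyRange_one] using h1
      have hks : k < speeds.length := by omega
      have hiter := PySem.List.getElem?_map_pyRange_zero
        (f := fun i => pvCeilDiv (100 - PySem.List.pyGetD progresses i 0)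
          (PySem.List.pyGetD speeds i 0)) (n := progresses.length) (k := k) hk
      rw [List.getElem?_eq_getElem h1] at hiter
      rw [Option.some.inj hiter]
      simp [PySem.List.pyGetD_natCast, List.getD_eq_getElem?_getD, hk, hks,
        List.getElem_zip]
  rw [hdays]
  set days := (progresses.zip speeds).map (fun ps => pvCeilDiv (100 - ps.1) ps.2) with hd
  have hlen : days.length = progresses.length := by
    simp [hd]
    omega
  have hdne : days ≠ [] := by
    intro h
    rw [h] at hlen
    exact hne (List.eq_nil_of_length_eq_zero (by simpa using hlen.symm))
  obtain ⟨d0, rest, hcons⟩ := List.exists_cons_of_ne_nil hdne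
  -- A's loop over indices is a fold over the day list itself
  have hbridge := PySem.List.foldl_pyRange_zero_pyGetD' (xs := days) (d := (0 : Int))
      (f := pvStepA) (init := (([] : List Int), (0 : Int), PySem.List.pyGetD days 0 0))
  rw [show (fun (acc : List Int × Int × Int) (j : Int) => pvStepA acc (PySem.List.pyGetD days j 0))
      = fun (st : List Int × Int × Int) i =>
        if PySem.List.pyGetD days i 0 ≤ st.2.2 then (st.1, st.2.1 + 1, st.2.2)
        else (st.1 ++ [st.2.1], 1, PySem.List.pyGetD days i 0) from rfl] at hbridge
  rw [hbridge]
  have h0 : PySem.List.pyGetD days 0 0 = d0 := by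
    rw [hcons]; exact PySem.List.pyGetD_zero_cons d0 rest 0
  rw [h0, pv_foldA, pv_foldB]
  -- B's histogram loop is Counter(release)
  rw [PySem.Dict.foldl_insert_getD_add_one_eq_counter]
  simp only [PySem.Dict.values, PySem.Dict.items_counter, List.map_map, List.nil_append]
  rw [hcons]
  have hrel : pvRel d0 (d0 :: rest) = d0 :: pvRel d0 rest := by
    simp [pvRel]
  rw [hrel]
  have hA : pvGroupsFrom 0 d0 (d0 :: rest) = pvGroupsFrom 1 d0 rest := by
    simp [pvGroupsFrom]
  rw [hA]
  have := pv_key rest d0 1 (by omega)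
  simpa using this
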